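-- pv_equiv track=rewrite | github.com/SNA24/social_network_algorithms | utilities/auctions.py | reached
-- ===== SOURCE A (Python) =====
-- def reached(seller_net, reports):
--
--     buyers = set()
--
--     for bidder in seller_net:
--         if bidder in reports.keys():
--             buyers.update(reports[bidder])
--
--     reached = set()
--
--     for bidder in buyers:
--         if bidder in reports.keys():
--             reached.update(reports[bidder])
--
--     buyers.update(reached)
--     buyers.update(seller_net)
--
--     return buyers
-- ===== SOURCE B (Python) =====
-- def reached(seller_net, reports):
--     # Precompose the relation: two_step[k] = everyone reachable from k in exactly two hops.
--     two_step = {k: [x for y in v for x in reports.get(y, [])] for k, v in reports.items()}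
--     pool = [x for b in seller_net for x in reports.get(b, [])]
--     pool += [x for b in seller_net for x in two_step.get(b, [])]
--     pool += seller_net
--     return set(pool)
-- ===== Notes on version B (the rewrite author's own statement) =====
-- stated objective: alternative
-- what changed: B precomputes the composed relation two_step = reports∘reports (a squared adjacency dict built from reports alone) and then collects direct hits, two-step hits and seller_net in a single scan over seller_net, instead of A's staged frontier expansion (level-1 set, then a second loop expanding that set).
import Mathlib
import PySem

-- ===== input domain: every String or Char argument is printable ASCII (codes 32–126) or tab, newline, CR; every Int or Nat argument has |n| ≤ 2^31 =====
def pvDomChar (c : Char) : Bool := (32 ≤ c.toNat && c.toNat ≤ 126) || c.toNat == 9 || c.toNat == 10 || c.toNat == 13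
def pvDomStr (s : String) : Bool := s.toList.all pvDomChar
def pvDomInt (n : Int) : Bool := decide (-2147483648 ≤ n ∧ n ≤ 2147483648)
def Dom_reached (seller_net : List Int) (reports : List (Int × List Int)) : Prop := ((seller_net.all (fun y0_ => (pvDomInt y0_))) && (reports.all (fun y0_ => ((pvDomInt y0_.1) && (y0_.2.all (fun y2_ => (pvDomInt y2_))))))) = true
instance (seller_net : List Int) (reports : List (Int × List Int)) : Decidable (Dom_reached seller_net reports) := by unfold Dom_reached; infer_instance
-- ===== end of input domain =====

-- B precomposes the report relation into a two-step adjacency dict (reports ∘ reports) built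
-- once from reports alone, then collects direct and two-step hits in a single scan over
-- seller_net, instead of A's staged frontier expansion (objective: alternative).

-- ===== PORT A =====
-- A: two loops updating sets via dict-key test + lookup, then two trailing updates.
def reached (seller_net : List Int) (reports : List (Int × List Int)) : List Int :=
  let buyers : PySem.Set Int :=
    seller_net.foldl (fun s bidder =>
      match reports.find? (fun p => p.1 == bidder) with
      | some p => PySem.Set.update s p.2
      | none => s) PySem.Set.empty
  let rch : PySem.Set Int :=
    buyers.foldl (fun s bidder =>
      match reports.find? (fun p => p.1 == bidder) with
      | some p => PySem.Set.update s p.2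
      | none => s) PySem.Set.empty
  let buyers := PySem.Set.update buyers rch
  PySem.Set.update buyers seller_net

-- ===== PORT B =====
-- reports.get(b, [])
def pvGet (reports : List (Int × List Int)) (b : Int) : List Int :=
  ((reports.find? (fun p => p.1 == b)).map Prod.snd).getD []

def reached_alt (seller_net : List Int) (reports : List (Int × List Int)) : List Int :=
  -- two_step = {k: [x for y in v for x in reports.get(y, [])] for k, v in reports.items()}
  let twoStep : List (Int × List Int) :=
    reports.map (fun p => (p.1, p.2.flatMap (fun y => pvGet reports y)))
  -- pool = [x for b in seller_net for x in reports.get(b, [])]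
  let pool := seller_net.flatMap (fun b => pvGet reports b)
  -- pool += [x for b in seller_net for x in two_step.get(b, [])]
  let pool := pool ++ seller_net.flatMap (fun b => pvGet twoStep b)
  -- pool += seller_net
  let pool := pool ++ seller_net
  PySem.Set.ofList pool

-- ===== PRECONDITION & SPEC =====
def Spec_reached (seller_net : List Int) (reports : List (Int × List Int)) (out : List Int) : Prop := out = reached_alt seller_net reports
instance (seller_net : List Int) (reports : List (Int × List Int)) (out : List Int) : Decidable (Spec_reached seller_net reports out) := by unfold Spec_reached; infer_instance

-- ===== CLAIM (what is proved, stated in full; the proofs are below) =====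
def Claim_equal_reached : Prop := ∀ (seller_net : List Int) (reports : List (Int × List Int)), Dom_reached seller_net reports → Spec_reached seller_net reports (reached seller_net reports)

-- ===== LEMMAS AND PROOFS =====

-- [x for b in bs for x in reports.get(b, [])]
def pvHits (reports : List (Int × List Int)) (bs : List Int) : List Int :=
  bs.flatMap (pvGet reports)

-- A's update loop over bidders equals one Set.update with the flatMapped hits.
theorem foldl_update_eq_update_hits (reports : List (Int × List Int))
    (bs : List Int) (s : PySem.Set Int) :
    bs.foldl (fun s bidder =>
      match reports.find? (fun p => p.1 == bidder) with
      | some p => PySem.Set.update s p.2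
      | none => s) s = PySem.Set.update s (pvHits reports bs) := by
  induction bs generalizing s with
  | nil => simp [pvHits, PySem.Set.update]
  | cons b rest ih =>
    simp only [List.foldl_cons, pvHits, List.flatMap_cons]
    rw [PySem.Set.update_append]
    cases h : reports.find? (fun p => p.1 == b) with
    | none => simpa [h, pvHits, pvGet, PySem.Set.update] using ih s
    | some p => simpa [h, pvHits, pvGet] using ih (PySem.Set.update s p.2)

-- updating with a list of already-present elements is a no-op
theorem update_of_subset (s : PySem.Set Int) (l : List Int) (h : ∀ x ∈ l, x ∈ s) :
    PySem.Set.update s l = s := by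
  induction l generalizing s with
  | nil => simp [PySem.Set.update]
  | cons x rest ih =>
    rw [PySem.Set.update_cons, PySem.Set.add_of_mem (h x (by simp))]
    exact ih s (fun y hy => h y (by simp [hy]))

-- KEY: hits of a dedup-style foldl add split off the seen prefix; no hypotheses needed,
-- since the hits of every already-seen bidder are inside 'update acc (hits seen)'.
theorem update_hits_foldl_add (reports : List (Int × List Int)) (X : List Int)
    (seen acc : PySem.Set Int) :
    PySem.Set.update acc (pvHits reports (X.foldl PySem.Set.add seen)) =
      PySem.Set.update (PySem.Set.update acc (pvHits reports seen)) (pvHits reports X) := by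
  induction X generalizing seen with
  | nil => simp [pvHits, PySem.Set.update]
  | cons b rest ih =>
    simp only [List.foldl_cons]
    by_cases hb : b ∈ seen
    · rw [PySem.Set.add_of_mem hb, ih seen]
      have hsub : PySem.Set.update (PySem.Set.update acc (pvHits reports seen)) (pvGet reports b)
          = PySem.Set.update acc (pvHits reports seen) := by
        apply update_of_subset
        intro x hx
        rw [PySem.Set.mem_update]
        right
        exact List.mem_flatMap.mpr ⟨b, hb, hx⟩
      calc PySem.Set.update (PySem.Set.update acc (pvHits reports seen)) (pvHits reports rest)
          = PySem.Set.update (PySem.Set.update (PySem.Set.update acc (pvHits reports seen)) (pvGet reports b)) (pvHits reports rest) := by rw [hsub]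
        _ = PySem.Set.update (PySem.Set.update acc (pvHits reports seen)) (pvGet reports b ++ pvHits reports rest) := by rw [PySem.Set.update_append]
        _ = PySem.Set.update (PySem.Set.update acc (pvHits reports seen)) (pvHits reports (b :: rest)) := by simp [pvHits]
    · rw [PySem.Set.add_of_not_mem hb, ih (seen ++ [b])]
      have h1 : pvHits reports (seen ++ [b]) = pvHits reports seen ++ pvGet reports b := by
        simp [pvHits]
      rw [h1, PySem.Set.update_append]
      rw [← PySem.Set.update_append]
      simp [pvHits]

-- hits of the dedup equal-as-set-update to hits of the raw list
theorem update_hits_ofList (reports : List (Int × List Int)) (X : List Int)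
    (acc : PySem.Set Int) :
    PySem.Set.update acc (pvHits reports (PySem.Set.ofList X)) =
      PySem.Set.update acc (pvHits reports X) := by
  rw [PySem.Set.ofList_eq_foldl, update_hits_foldl_add]
  simp [pvHits, PySem.Set.update]

-- updating with a deduplicated list equals updating with the raw list
theorem update_ofList (s : PySem.Set Int) (xs : List Int) :
    PySem.Set.update s (PySem.Set.ofList xs) = PySem.Set.update s xs := by
  rw [PySem.Set.update_eq_append_filter s (PySem.Set.ofList xs),
      PySem.Set.update_eq_append_filter s xs, PySem.Set.ofList_ofList]

-- B's two_step lookup is the one-step hits of the one-step lookup.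
theorem pvGet_twoStep (reports : List (Int × List Int)) (b : Int) :
    pvGet (reports.map (fun p => (p.1, p.2.flatMap (fun y => pvGet reports y)))) b =
      pvHits reports (pvGet reports b) := by
  unfold pvGet
  rw [List.find?_map]
  have hcomp : ((fun (p : Int × List Int) => p.1 == b) ∘
      (fun (p : Int × List Int) => (p.1, p.2.flatMap (fun y => ((reports.find? (fun q => q.1 == y)).map Prod.snd).getD [])))) =
      fun (p : Int × List Int) => p.1 == b := rfl
  rw [hcomp]
  cases h : reports.find? (fun p => p.1 == b) with
  | none => simp [pvHits]
  | some p => simp only [Option.map_some, Option.getD_some, pvHits]; rfl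

-- ===== VERDICT (by name: the statement is the Claim_ definition above) =====
theorem reached_spec : Claim_equal_reached := by
  intro seller_net reports _
  unfold Spec_reached reached reached_alt
  simp only [foldl_update_eq_update_hits, PySem.Set.update_empty]
  rw [PySem.Set.ofList_append, PySem.Set.ofList_append]
  rw [update_ofList, update_hits_ofList]
  simp only [pvGet_twoStep, pvHits, List.flatMap_assoc]
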